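-- pv_equiv track=rewrite | github.com/ryos36/polyphony-tutorial | OpenSuCo2017/list_mul.py | list_mul
-- ===== SOURCE A (Python) =====
-- def list_mul(lst):
--     old_i = 0
--     v = 0
--     for i in range(len(lst)):
--         if (i & 1) == 1 :
--             v += lst[old_i] * lst[i]
--         old_i = i
--
--     return v
-- ===== SOURCE B (Python) =====
-- def list_mul(lst):
--     it = iter(lst)
--     return sum(a * b for a, b in zip(it, it))
-- ===== Notes on version B (the rewrite author's own statement) =====
-- stated objective: idiomatic
-- what changed: Replaced the index loop with its parity test and lagged old_i register by the iterator-pairing idiom zip(it, it), summing products of consecutive pairs directly.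
import Mathlib
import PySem

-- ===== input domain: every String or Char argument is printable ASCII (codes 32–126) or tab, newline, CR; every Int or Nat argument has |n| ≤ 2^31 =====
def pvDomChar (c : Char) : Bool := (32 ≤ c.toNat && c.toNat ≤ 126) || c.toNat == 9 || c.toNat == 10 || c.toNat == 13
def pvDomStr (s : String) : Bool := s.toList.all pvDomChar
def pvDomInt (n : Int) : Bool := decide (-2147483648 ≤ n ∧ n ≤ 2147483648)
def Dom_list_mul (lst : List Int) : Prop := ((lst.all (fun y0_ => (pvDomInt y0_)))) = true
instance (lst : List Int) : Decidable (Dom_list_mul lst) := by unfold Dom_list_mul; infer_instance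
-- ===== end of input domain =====

-- B replaces A's index loop (parity test + lagged old_i register) with an
-- iterator-pairing sum over consecutive pairs; same O(n) cost, plainer code.


-- ===== PORT A =====
-- loop state is (old_i, v); lst[old_i] / lst[i] are always in range, so pyGetD 0 is exact
def list_mul (lst : List Int) : Int :=
  ((PySem.List.pyRange 0 (lst.length : Int) 1).foldl
    (fun (s : Int × Int) i =>
      (i, if PySem.Int.band i 1 = 1
            then s.2 + PySem.List.pyGetD lst s.1 0 * PySem.List.pyGetD lst i 0
            else s.2))
    (0, 0)).2

-- ===== PORT B =====
-- zip(it, it) over one iterator yields consecutive pairs; sum of products = two-at-a-time recursion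
def list_mul_alt : List Int → Int
  | x :: y :: r => x * y + list_mul_alt r
  | _ => 0

-- ===== PRECONDITION & SPEC =====
def Spec_list_mul (lst : List Int) (out : Int) : Prop := out = list_mul_alt lst
instance (lst : List Int) (out : Int) : Decidable (Spec_list_mul lst out) := by unfold Spec_list_mul; infer_instance

-- ===== CLAIM (what is proved, stated in full; the proofs are below) =====
def Claim_equal_list_mul : Prop := ∀ (lst : List Int), Dom_list_mul lst → Spec_list_mul lst (list_mul lst)

-- ===== LEMMAS AND PROOFS =====

theorem alt_append_singleton : ∀ (ys : List Int) (a : Int),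
    list_mul_alt (ys ++ [a]) =
      list_mul_alt ys + (if ys.length % 2 = 1 then ys.getD (ys.length - 1) 0 * a else 0)
  | [], _ => by simp [list_mul_alt]
  | [x], a => by simp [list_mul_alt]
  | x :: y :: r, a => by
    have ih := alt_append_singleton r a
    simp only [List.cons_append, list_mul_alt, ih, List.length_cons]
    rcases r with _ | ⟨z, r'⟩
    · simp [list_mul_alt]
    · by_cases h : (z :: r').length % 2 = 1
      · have h' : ((z :: r').length + 1 + 1) % 2 = 1 := by omega
        have e1 : (z :: r').length + 1 + 1 - 1 = r'.length + 1 + 1 := rfl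
        have e2 : (z :: r').length - 1 = r'.length := rfl
        rw [h', e1, e2]
        simp only [h, if_true, List.getD_cons_succ]
        ring
      · simp only [List.length_cons] at h
        have h3 : ¬ (r'.length + 1 + 1 + 1) % 2 = 1 := by omega
        simp [h, h3]

lemma loop_invariant (lst : List Int) (n : Nat) (hn : n ≤ lst.length) :
    (PySem.List.pyRange 0 (n : Int) 1).foldl
      (fun (s : Int × Int) i =>
        (i, if PySem.Int.band i 1 = 1
              then s.2 + PySem.List.pyGetD lst s.1 0 * PySem.List.pyGetD lst i 0
              else s.2))
      (0, 0)
    = (max ((n : Int) - 1) 0, list_mul_alt (lst.take n)) := by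
  induction n with
  | zero => simp [PySem.List.pyRange_one_eq_nil, list_mul_alt]
  | succ m ih =>
      have hm : m ≤ lst.length := Nat.le_of_succ_le hn
      have hcast : ((m + 1 : Nat) : Int) = (m : Int) + 1 := by push_cast; ring
      rw [hcast, PySem.List.pyRange_one_succ_right (a := 0) (b := (m : Int)) (by positivity),
          List.foldl_append, ih hm]
      simp only [List.foldl_cons, List.foldl_nil]
      have hband : PySem.Int.band (m : Int) 1 = ((m &&& 1 : Nat) : Int) := by
        exact_mod_cast PySem.Int.band_natCast m 1
      have hand : m &&& 1 = m % 2 := Nat.and_one_is_mod m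
      have htake : lst.take (m + 1) = lst.take m ++ [lst.getD m 0] := by
        have hlt : m < lst.length := hn
        rw [List.take_add_one]
        simp [List.getD_eq_getElem?_getD, List.getElem?_eq_getElem hlt]
      rw [htake, alt_append_singleton]
      have hlen : (lst.take m).length = m := by rw [List.length_take]; omega
      by_cases hpar : m % 2 = 1
      · have hm1 : 1 ≤ m := by omega
        have hmax : max ((m : Int) - 1) 0 = ((m - 1 : Nat) : Int) := by
          push_cast [hm1]; omega
        have hgd : (lst.take m).getD (m - 1) 0 = lst.getD (m - 1) 0 := by
          rw [List.getD_eq_getElem?_getD, List.getD_eq_getElem?_getD,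
              List.getElem?_take_of_lt (by omega)]
        simp only [hband, hand, hpar, hlen, hmax, hgd,
                   PySem.List.pyGetD_natCast]
        simp
      · have hpar0 : m % 2 = 0 := by omega
        simp only [hband, hand, hpar0, hlen]
        simp

-- ===== VERDICT (by name: the statement is the Claim_ definition above) =====
theorem list_mul_spec : Claim_equal_list_mul := by
  intro lst _
  unfold Spec_list_mul list_mul
  rw [loop_invariant lst lst.length le_rfl]
  simp
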